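-- pv_equiv track=rewrite | github.com/applego/Algorithm_etc | AOJ/ALDS1_5_B_マージソート copy.py | count
-- ===== SOURCE A (Python) =====
-- def count(left, right):
--     cnt = 0
--     if left + 1 < right:
--         mid = (left + right) >> 1
--         cnt += count(left, mid)
--         cnt += count(mid, right)
--         cnt += (right - left)
--     return cnt
-- ===== SOURCE B (Python) =====
-- def count(left, right):
--     n = right - left
--     if n < 2:
--         return 0
--     k = (n - 1).bit_length()
--     return n * k - (1 << k) + n
-- ===== Notes on version B (the rewrite author's own statement) =====
-- stated objective: faster
-- what changed: Replaces the O(n) recursive merge-sort split recursion with the closed form n*ceil(log2 n) - 2^ceil(log2 n) + n computed from one bit_length call.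
import Mathlib
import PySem

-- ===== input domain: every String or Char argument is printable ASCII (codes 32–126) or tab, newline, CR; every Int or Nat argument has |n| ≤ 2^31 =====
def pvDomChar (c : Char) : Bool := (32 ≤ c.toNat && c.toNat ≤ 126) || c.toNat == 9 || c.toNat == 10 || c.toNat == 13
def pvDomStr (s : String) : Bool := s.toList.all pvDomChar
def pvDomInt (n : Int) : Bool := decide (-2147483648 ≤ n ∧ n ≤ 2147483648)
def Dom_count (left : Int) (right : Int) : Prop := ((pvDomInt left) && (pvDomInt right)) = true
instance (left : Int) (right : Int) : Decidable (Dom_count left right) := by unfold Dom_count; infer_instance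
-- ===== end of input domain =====

-- B replaces A's O(n) recursion over merge-sort splits by the closed form
-- n*ceil(log2 n) - 2^ceil(log2 n) + n from one bit_length call (objective: faster).

-- ===== PORT A =====
def count (left : Int) (right : Int) : Int :=
  if _h : left + 1 < right then
    let mid := (left + right) >>> (1 : Nat)   -- Python's '>> 1' is Lean's '>>> 1' on Int
    count left mid + count mid right + (right - left)
  else 0
termination_by (right - left).toNat
decreasing_by
  all_goals
    have hm : (left + right) >>> (1 : Nat) = (left + right) / 2 := by
      rw [Int.shiftRight_eq_div_pow]; norm_num
    rw [hm]
    omega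

-- ===== PORT B =====
def count_alt (left : Int) (right : Int) : Int :=
  let n := right - left
  if n < 2 then 0
  else
    let k := PySem.Int.bitLength (n - 1)   -- (n-1).bit_length()
    n * (k : Int) - 2 ^ k + n              -- '1 << k' is 2 ^ k

-- ===== PRECONDITION & SPEC =====
def Spec_count (left : Int) (right : Int) (out : Int) : Prop := out = count_alt left right
instance (left : Int) (right : Int) (out : Int) : Decidable (Spec_count left right out) := by unfold Spec_count; infer_instance

-- ===== CLAIM (what is proved, stated in full; the proofs are below) =====
def Claim_equal_count : Prop := ∀ (left : Int) (right : Int), Dom_count left right → Spec_count left right (count left right)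

-- ===== LEMMAS AND PROOFS =====

-- the closed form as a function of the interval length alone
def gI (n : Int) : Int :=
  if n < 2 then 0
  else n * (PySem.Int.bitLength (n - 1) : Int) - 2 ^ PySem.Int.bitLength (n - 1) + n

theorem count_alt_eq_gI (l r : Int) : count_alt l r = gI (r - l) := rfl

theorem bl_bounds (m : Int) (hm : 1 ≤ m) :
    (2 : Int) ^ (PySem.Int.bitLength m - 1) ≤ m ∧ m < 2 ^ PySem.Int.bitLength m := by
  have h1 := PySem.Int.two_pow_bitLength_le m (by omega)
  have h2 := PySem.Int.lt_two_pow_bitLength m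
  have habs : (m.natAbs : Int) = m := Int.natAbs_of_nonneg (by omega)
  constructor
  · calc (2 : Int) ^ (PySem.Int.bitLength m - 1) = ((2 ^ (PySem.Int.bitLength m - 1) : Nat) : Int) := by push_cast; ring
    _ ≤ (m.natAbs : Int) := by exact_mod_cast h1
    _ = m := habs
  · calc m = (m.natAbs : Int) := habs.symm
    _ < ((2 ^ PySem.Int.bitLength m : Nat) : Int) := by exact_mod_cast h2
    _ = 2 ^ PySem.Int.bitLength m := by push_cast; ring

theorem bl_eq (m : Int) (k : Nat) (hk : 1 ≤ k)
    (h1 : (2 : Int) ^ (k - 1) ≤ m) (h2 : m < 2 ^ k) : PySem.Int.bitLength m = k := by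
  have hm : 1 ≤ m := le_trans (one_le_pow₀ (by norm_num)) h1
  obtain ⟨b1, b2⟩ := bl_bounds m hm
  set b := PySem.Int.bitLength m with hb
  by_contra hne
  rcases Nat.lt_or_ge b k with hlt | hge
  · have : (2 : Int) ^ b ≤ 2 ^ (k - 1) := pow_le_pow_right₀ (by norm_num) (by omega)
    omega
  · have hk' : k < b := by omega
    have : (2 : Int) ^ k ≤ 2 ^ (b - 1) := pow_le_pow_right₀ (by norm_num) (by omega)
    omega

theorem key (n : Int) (h2 : 2 ≤ n) : gI (n / 2) + gI (n - n / 2) + n = gI n := by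
  by_cases hsmall : n < 4
  · interval_cases n <;> decide
  · rw [not_lt] at hsmall
    obtain ⟨hb1, hb2⟩ := bl_bounds (n - 1) (by omega)
    obtain ⟨k, hkdef⟩ : ∃ k, PySem.Int.bitLength (n - 1) = k := ⟨_, rfl⟩
    rw [hkdef] at hb1 hb2
    have hk2 : 2 ≤ k := by
      by_contra hc
      have : (2 : Int) ^ k ≤ 2 ^ 1 := pow_le_pow_right₀ (by norm_num) (by omega)
      omega
    have hP1 : (1 : Int) ≤ 2 ^ (k - 2) := one_le_pow₀ (by norm_num)
    have hPm : (2 : Int) ^ (k - 1) = 2 * 2 ^ (k - 2) := by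
      conv_lhs => rw [show k - 1 = (k - 2) + 1 from by omega]
      rw [pow_succ]; ring
    have hKm : (2 : Int) ^ k = 4 * 2 ^ (k - 2) := by
      conv_lhs => rw [show k = (k - 2) + 2 from by omega]
      rw [pow_add]; ring
    rw [hPm] at hb1
    rw [hKm] at hb2
    have hkb : PySem.Int.bitLength (n - n / 2 - 1) = k - 1 := by
      apply bl_eq _ _ (by omega)
      · rw [show k - 1 - 1 = k - 2 from by omega]; omega
      · rw [hPm]; omega
    have hc1 : ((k - 1 : Nat) : Int) = (k : Int) - 1 := by
      push_cast [Nat.cast_sub (by omega : 1 ≤ k)]; ring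
    by_cases hodd : n - 1 = 2 * 2 ^ (k - 2)
    · -- n = 2^(k-1) + 1 : the two halves have different bit lengths
      have hk3 : 3 ≤ k := by
        by_contra hc
        have hkk : k = 2 := by omega
        rw [hkk] at hodd; norm_num at hodd; omega
      have hQ : (2 : Int) ^ (k - 2) = 2 * 2 ^ (k - 3) := by
        conv_lhs => rw [show k - 2 = (k - 3) + 1 from by omega]
        rw [pow_succ]; ring
      have hQ1 : (1 : Int) ≤ 2 ^ (k - 3) := one_le_pow₀ (by norm_num)
      have hka : PySem.Int.bitLength (n / 2 - 1) = k - 2 := by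
        apply bl_eq _ _ (by omega)
        · rw [show k - 2 - 1 = k - 3 from by omega]; omega
        · rw [hQ]; omega
      have hc2 : ((k - 2 : Nat) : Int) = (k : Int) - 2 := by
        push_cast [Nat.cast_sub (by omega : 2 ≤ k)]; ring
      have e3 : n = 2 * 2 ^ (k - 2) + 1 := by omega
      unfold gI
      rw [if_neg (by omega), if_neg (by omega), if_neg (by omega)]
      rw [hka, hkb, hkdef, hc1, hc2, hPm, hKm]
      rw [show n / 2 = 2 ^ (k - 2) from by omega,
          show n - 2 ^ (k - 2) = 2 ^ (k - 2) + 1 from by omega]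
      rw [e3]; ring
    · -- both halves have bit length k-1
      have hka : PySem.Int.bitLength (n / 2 - 1) = k - 1 := by
        apply bl_eq _ _ (by omega)
        · rw [show k - 1 - 1 = k - 2 from by omega]; omega
        · rw [hPm]; omega
      unfold gI
      rw [if_neg (by omega), if_neg (by omega), if_neg (by omega)]
      rw [hka, hkb, hkdef, hc1, hPm, hKm]
      ring

theorem count_eq_gI : ∀ (N : Nat) (l r : Int), (r - l).toNat = N → count l r = gI (r - l) := by
  intro N
  induction N using Nat.strong_induction_on with
  | _ N ih =>
    intro l r hN
    rw [count]
    by_cases h : l + 1 < r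
    · rw [dif_pos h]
      have hm : (l + r) >>> (1 : Nat) = (l + r) / 2 := by
        rw [Int.shiftRight_eq_div_pow]; norm_num
      simp only [hm]
      have e1 : count l ((l + r) / 2) = gI ((l + r) / 2 - l) :=
        ih ((l + r) / 2 - l).toNat (by omega) l ((l + r) / 2) rfl
      have e2 : count ((l + r) / 2) r = gI (r - (l + r) / 2) :=
        ih (r - (l + r) / 2).toNat (by omega) ((l + r) / 2) r rfl
      rw [e1, e2,
        show (l + r) / 2 - l = (r - l) / 2 from by omega,
        show r - (l + r) / 2 = (r - l) - (r - l) / 2 from by omega]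
      exact key (r - l) (by omega)
    · rw [dif_neg h]
      unfold gI
      rw [if_pos (by omega)]

-- ===== VERDICT (by name: the statement is the Claim_ definition above) =====
theorem count_spec : Claim_equal_count := by
  intro l r _
  unfold Spec_count
  rw [count_alt_eq_gI]
  exact count_eq_gI _ l r rfl
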